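-- pv_equiv track=rewrite | github.com/devsgk/LeetCode | 2644-find-the-maximum-divisibility-score/2644-find-the-maximum-divisibility-score.py | maxDivScore
-- ===== SOURCE A (Python) =====
-- from typing import List
--
-- def maxDivScore(nums: List[int], divisors: List[int]) -> int:
--     result = []
--
--     for divisor in divisors:
--       count = 0
--
--       for num in nums:
--         if num % divisor == 0: count += 1
--
--       result.append([divisor, count])
--
--     result.sort(key = lambda x: (-x[1], x[0]))
--
--     return result[0][0]
-- ===== SOURCE B (Python) =====
-- def maxDivScore(nums, divisors):
--     best = None  # (count, divisor) of the best divisor seen so far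
--     for d in divisors:
--         c = sum(1 for n in nums if n % d == 0)
--         if best is None or c > best[0] or (c == best[0] and d < best[1]):
--             best = (c, d)
--     return best[1]
-- ===== Notes on version B (the rewrite author's own statement) =====
-- stated objective: simpler
-- what changed: Drops A's result table and full sort: a single pass over divisors keeps the running best (count, divisor) pair, updating on strictly larger count or equal count with smaller divisor.
import Mathlib
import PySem

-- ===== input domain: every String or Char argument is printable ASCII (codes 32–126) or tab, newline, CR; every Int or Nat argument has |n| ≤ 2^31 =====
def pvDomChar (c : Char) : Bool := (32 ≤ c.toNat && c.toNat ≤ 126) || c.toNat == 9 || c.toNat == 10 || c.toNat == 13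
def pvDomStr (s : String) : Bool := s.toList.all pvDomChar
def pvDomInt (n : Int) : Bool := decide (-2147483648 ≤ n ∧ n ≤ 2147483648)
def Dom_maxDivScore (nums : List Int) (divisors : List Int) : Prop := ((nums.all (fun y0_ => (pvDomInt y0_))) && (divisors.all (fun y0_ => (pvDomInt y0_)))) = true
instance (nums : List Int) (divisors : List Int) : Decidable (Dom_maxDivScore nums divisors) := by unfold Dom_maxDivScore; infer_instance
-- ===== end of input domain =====

-- B replaces A's build-table-then-sort with a single pass keeping the best (count, divisor) pair; same result on nonempty, zero-free divisor lists.


-- ===== PORT A =====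
-- inner loop 'for num in nums: if num % divisor == 0: count += 1'
def pvCountA (nums : List Int) (d : Int) : Int :=
  nums.foldl (fun count num => if PySem.Int.mod num d == 0 then count + 1 else count) 0

def maxDivScore (nums : List Int) (divisors : List Int) : Int :=
  -- for divisor in divisors: … result.append([divisor, count])
  let result : List (Int × Int) :=
    divisors.foldl (fun acc divisor => acc ++ [(divisor, pvCountA nums divisor)]) []
  -- result.sort(key = lambda x: (-x[1], x[0]))
  let result := PySem.List.sorted2 result (fun x => -x.2) (fun x => x.1)
  -- return result[0][0]  (IndexError on empty divisors: excluded by Pre_)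
  match PySem.List.pyGet? result 0 with
  | some p => p.1
  | none => 0

-- ===== PORT B =====
-- c = sum(1 for n in nums if n % d == 0)
def pvCountB (nums : List Int) (d : Int) : Int :=
  ((nums.filter (fun n => PySem.Int.mod n d == 0)).map (fun _ => (1 : Int))).sum

def maxDivScore_alt (nums : List Int) (divisors : List Int) : Int :=
  let best : Option (Int × Int) :=
    divisors.foldl (fun best d =>
      let c := pvCountB nums d
      match best with
      | none => some (c, d)
      | some (bc, bd) => if c > bc ∨ (c = bc ∧ d < bd) then some (c, d) else some (bc, bd)) none
  -- return best[1]  (TypeError on empty divisors: excluded by Pre_)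
  match best with
  | some (_, bd) => bd
  | none => 0

-- ===== PRECONDITION & SPEC =====
-- Pre_ excludes exactly the inputs on which the Python A raises: empty divisors (IndexError
-- on result[0]) and, when nums is nonempty, a 0 among divisors (ZeroDivisionError in
-- num % divisor; with empty nums that expression is never evaluated and A returns).
def Pre_maxDivScore (nums : List Int) (divisors : List Int) : Prop :=
  divisors ≠ [] ∧ (nums = [] ∨ (0 : Int) ∉ divisors)
instance (nums : List Int) (divisors : List Int) : Decidable (Pre_maxDivScore nums divisors) := by unfold Pre_maxDivScore; infer_instance
def pvWitness_maxDivScore : List Int × List Int := ([4, 7, 9], [2, 3, 3])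

def Spec_maxDivScore (nums : List Int) (divisors : List Int) (out : Int) : Prop := out = maxDivScore_alt nums divisors
instance (nums : List Int) (divisors : List Int) (out : Int) : Decidable (Spec_maxDivScore nums divisors out) := by unfold Spec_maxDivScore; infer_instance

-- ===== CLAIM (what is proved, stated in full; the proofs are below) =====
def Claim_equal_maxDivScore : Prop := ∀ (nums : List Int) (divisors : List Int), Dom_maxDivScore nums divisors → Pre_maxDivScore nums divisors → Spec_maxDivScore nums divisors (maxDivScore nums divisors)

-- ===== LEMMAS AND PROOFS =====

-- A's comparison step (the sort's before-relation folded into a keep-first-min loop)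
def pickA (o : Option (Int × Int)) (x : Int × Int) : Option (Int × Int) :=
  match o with
  | none => some x
  | some m => if (decide (-x.2 < -m.2) || !decide (-m.2 < -x.2) && decide (x.1 < m.1)) then some x else some m

-- B's fold step
def pickB (nums : List Int) (best : Option (Int × Int)) (d : Int) : Option (Int × Int) :=
  let c := pvCountB nums d
  match best with
  | none => some (c, d)
  | some (bc, bd) => if c > bc ∨ (c = bc ∧ d < bd) then some (c, d) else some (bc, bd)

-- the two count loops agree
lemma count_eq (nums : List Int) (d : Int) : pvCountA nums d = pvCountB nums d := by
  unfold pvCountA pvCountB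
  induction nums using List.reverseRecOn with
  | nil => rfl
  | append_singleton xs x ih =>
      simp only [List.foldl_append, List.foldl_cons, List.foldl_nil, List.filter_append,
        List.map_append, List.sum_append, ih]
      by_cases h : PySem.Int.mod x d == 0 <;> simp [h]

lemma head?_insertBy {α : Type} (before : α → α → Bool) (x : α) (l : List α) :
    (PySem.List.insertBy before x l).head? =
      some (match l with | [] => x | y :: _ => if before x y then x else y) := by
  cases l with
  | nil => rfl
  | cons y ys => simp only [PySem.List.insertBy]; split <;> simp_all

-- head of an insertBy-fold is computed by the keep-first-minimum fold
lemma head?_foldl_insertBy {α : Type} (before : α → α → Bool) (xs : List α) (acc : List α) :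
    (xs.foldl (fun a x => PySem.List.insertBy before x a) acc).head? =
      xs.foldl (fun o x =>
        match o with
        | none => some x
        | some m => if before x m then some x else some m) acc.head? := by
  induction xs generalizing acc with
  | nil => rfl
  | cons x xs ih =>
      simp only [List.foldl_cons, ih]
      congr 1
      rw [head?_insertBy]
      cases acc with
      | nil => rfl
      | cons y ys => simp only [List.head?_cons]; by_cases h : before x y <;> simp [h]

-- pyGet? at 0 is head?
lemma pyGet?_zero {α : Type} (l : List α) : PySem.List.pyGet? l 0 = l.head? := by
  cases l <;> simp [PySem.List.pyGet?, PySem.List.pyIdx?]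

-- the head of A's sort is the pickA fold
lemma head?_sorted2 (xs : List (Int × Int)) :
    (PySem.List.sorted2 xs (fun x => -x.2) (fun x => x.1)).head? = xs.foldl pickA none := by
  rw [show PySem.List.sorted2 xs (fun x : Int × Int => -x.2) (fun x : Int × Int => x.1) =
      xs.foldl (fun a x => PySem.List.insertBy
        (fun a b : Int × Int => decide (-a.2 < -b.2) || !decide (-b.2 < -a.2) && decide (a.1 < b.1)) x a) [] from rfl]
  rw [head?_foldl_insertBy]
  simp only [List.head?_nil]
  congr 1
  funext o x
  cases o <;> rfl

-- the single comparison steps agree, through the component swap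
lemma pick_step (nums : List Int) (d : Int) (o : Option (Int × Int)) :
    pickA o (d, pvCountA nums d)
      = Option.map (fun p => (p.2, p.1)) (pickB nums (Option.map (fun p => (p.2, p.1)) o) d) := by
  cases o with
  | none => simp [pickA, pickB, count_eq]
  | some m =>
      obtain ⟨bd, bc⟩ := m
      have hiff : ((decide (-(pvCountA nums d) < -bc) || !decide (-bc < -(pvCountA nums d)) && decide (d < bd)) = true)
          ↔ (pvCountB nums d > bc ∨ (pvCountB nums d = bc ∧ d < bd)) := by
        rw [count_eq]
        simp only [Bool.or_eq_true, Bool.and_eq_true, Bool.not_eq_eq_eq_not, Bool.not_true,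
          decide_eq_true_eq, decide_eq_false_iff_not]
        omega
      simp only [pickA, pickB, Option.map_some]
      by_cases h : pvCountB nums d > bc ∨ (pvCountB nums d = bc ∧ d < bd)
      · rw [if_pos (hiff.mpr h), if_pos h, Option.map_some, count_eq]
      · rw [if_neg (fun hc => h (hiff.mp hc)), if_neg h, Option.map_some]

-- A's sorted-head fold over the (divisor, count) pairs equals B's fold, up to the swap
lemma fold_agree (nums : List Int) (ds : List Int) (o : Option (Int × Int)) :
    (ds.map (fun d => (d, pvCountA nums d))).foldl pickA o
      = Option.map (fun p => (p.2, p.1)) (ds.foldl (pickB nums) (Option.map (fun p => (p.2, p.1)) o)) := by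
  induction ds generalizing o with
  | nil => cases o <;> rfl
  | cons d ds ih =>
      simp only [List.map_cons, List.foldl_cons]
      rw [pick_step nums d o, ih]
      congr 1
      cases pickB nums (Option.map (fun p => (p.2, p.1)) o) d <;> rfl

-- B's fold never returns none from a some accumulator
lemma foldl_pickB_some_ne_none (nums : List Int) (l : List Int) :
    ∀ p : Int × Int, l.foldl (pickB nums) (some p) ≠ none := by
  induction l with
  | nil => intro p h; cases h
  | cons y ys ih =>
      intro p
      obtain ⟨bc, bd⟩ := p
      simp only [List.foldl_cons]
      by_cases h : pvCountB nums y > bc ∨ (pvCountB nums y = bc ∧ y < bd)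
      · rw [show pickB nums (some (bc, bd)) y = some (pvCountB nums y, y) from by simp [pickB, h]]
        apply ih
      · rw [show pickB nums (some (bc, bd)) y = some (bc, bd) from by simp [pickB, h]]
        apply ih

-- the list A sorts is the map of the count function over divisors
lemma result_eq_map (nums : List Int) (divisors : List Int) :
    divisors.foldl (fun acc divisor => acc ++ [(divisor, pvCountA nums divisor)]) []
      = divisors.map (fun d => (d, pvCountA nums d)) := by
  induction divisors using List.reverseRecOn with
  | nil => rfl
  | append_singleton xs x ih => simp [ih]

-- ===== VERDICT (by name: the statement is the Claim_ definition above) =====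
theorem maxDivScore_spec : Claim_equal_maxDivScore := by
  intro nums divisors _ hpre
  unfold Spec_maxDivScore maxDivScore maxDivScore_alt
  simp only [result_eq_map, pyGet?_zero, head?_sorted2, fold_agree]
  rw [show (fun best d => let c := pvCountB nums d;
        match best with
        | none => some (c, d)
        | some (bc, bd) => if c > bc ∨ (c = bc ∧ d < bd) then some (c, d) else some (bc, bd)) = pickB nums from by
      funext o d; cases o <;> rfl]
  simp only [Option.map_none]
  cases hb : divisors.foldl (pickB nums) none with
  | none =>
      exfalso
      obtain ⟨hne, -⟩ := hpre
      cases divisors with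
      | nil => exact hne rfl
      | cons d ds =>
          rw [List.foldl_cons, show pickB nums none d = some (pvCountB nums d, d) from rfl] at hb
          exact foldl_pickB_some_ne_none nums ds _ hb
  | some p => obtain ⟨bc, bd⟩ := p; rfl
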